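-- pv_equiv track=rewrite | github.com/Irene-miao/mit_cs_intro_python | ex_L12.py | count_sqrts
-- ===== SOURCE A (Python) =====
-- def count_sqrts(nums_list):
--     """
--     nums_list: a list
--     Assumes that nums_list only contains positive numbers and that there are no duplicates.
--     Returns how many elements in nums_list are exact squares of elements in the same list, including itself.
--     """
--     # Your code here
--     copy = nums_list[:]
--     number = []
--     for c in copy:
--         for el in nums_list:
--             if c**2 == el:
--                 number.append(c)
--     return len(number)
-- ===== SOURCE B (Python) =====
-- def count_sqrts(nums_list):
--     # one-pass frequency index, then sum occurrences of each square: O(n) vs A's O(n^2)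
--     freq = {}
--     for el in nums_list:
--         freq[el] = freq.get(el, 0) + 1
--     total = 0
--     for c in nums_list:
--         total += freq.get(c * c, 0)
--     return total
-- ===== Notes on version B (the rewrite author's own statement) =====
-- stated objective: faster
-- what changed: Builds a frequency dictionary in one pass and sums freq[c*c] per element, eliminating A's inner linear scan and its appended witness list.
import Mathlib
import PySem

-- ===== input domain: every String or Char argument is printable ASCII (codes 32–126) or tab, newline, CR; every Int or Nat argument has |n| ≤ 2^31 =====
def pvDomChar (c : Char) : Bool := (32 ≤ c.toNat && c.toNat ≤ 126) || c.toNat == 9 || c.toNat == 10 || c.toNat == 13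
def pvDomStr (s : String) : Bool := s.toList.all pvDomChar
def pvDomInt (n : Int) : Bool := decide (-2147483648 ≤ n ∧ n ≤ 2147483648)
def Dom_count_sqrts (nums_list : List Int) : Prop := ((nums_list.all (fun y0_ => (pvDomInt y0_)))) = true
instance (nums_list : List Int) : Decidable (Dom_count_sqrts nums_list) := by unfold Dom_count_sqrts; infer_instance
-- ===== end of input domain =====

-- B replaces A's quadratic nested scan by a one-pass frequency dictionary plus a sum of lookups (return value only; neither mutates its argument).

-- ===== PORT A =====
def count_sqrts (nums_list : List Int) : Int :=
  let copy := nums_list  -- nums_list[:] : a full copy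
  let number : List Int :=
    copy.foldl (fun number c =>
      nums_list.foldl (fun number el =>
        if c ^ 2 == el then number ++ [c] else number) number) []
  (number.length : Int)

-- ===== PORT B =====
def count_sqrts_alt (nums_list : List Int) : Int :=
  let freq : PySem.Dict Int Int :=
    nums_list.foldl (fun d el => d.insert el (d.getD el 0 + 1)) PySem.Dict.empty
  nums_list.foldl (fun total c => total + freq.getD (c * c) 0) 0

-- ===== PRECONDITION & SPEC =====
def Spec_count_sqrts (nums_list : List Int) (out : Int) : Prop := out = count_sqrts_alt nums_list
instance (nums_list : List Int) (out : Int) : Decidable (Spec_count_sqrts nums_list out) := by unfold Spec_count_sqrts; infer_instance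

-- ===== CLAIM (what is proved, stated in full; the proofs are below) =====
def Claim_equal_count_sqrts : Prop := ∀ (nums_list : List Int), Dom_count_sqrts nums_list → Spec_count_sqrts nums_list (count_sqrts nums_list)

-- ===== LEMMAS AND PROOFS =====

-- inner loop of A: appends c once per occurrence of c^2
theorem pv_inner_len (l : List Int) (c : Int) (acc : List Int) :
    (l.foldl (fun n el => if c ^ 2 == el then n ++ [c] else n) acc).length
      = acc.length + l.count (c ^ 2) := by
  induction l generalizing acc with
  | nil => simp [List.count]
  | cons x xs ih =>
    simp only [List.foldl_cons]
    rw [ih]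
    by_cases h : c ^ 2 = x
    · simp [h, List.count_cons]; omega
    · have hx : (c ^ 2 == x) = false := by simp [h]
      have hx' : (x == c ^ 2) = false := by simp [Ne.symm h]
      simp [hx, hx', List.count_cons]

-- outer loop of A: total length = sum over elements of count of their square
theorem pv_outer_len (l nums : List Int) (acc : List Int) :
    (l.foldl (fun number c =>
        nums.foldl (fun n el => if c ^ 2 == el then n ++ [c] else n) number) acc).length
      = acc.length + (l.map (fun c => (nums.count (c ^ 2) : Int))).sum := by
  induction l generalizing acc with
  | nil => simp
  | cons x xs ih =>
    simp only [List.foldl_cons, List.map_cons, List.sum_cons, ih, pv_inner_len]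
    push_cast
    ring

theorem count_sqrts_eq (nums_list : List Int) :
    count_sqrts nums_list = count_sqrts_alt nums_list := by
  unfold count_sqrts count_sqrts_alt
  simp only [PySem.Dict.getD_foldl_insert_add_one, PySem.List.foldl_add]
  have h := pv_outer_len nums_list nums_list []
  have hgetD : ∀ v : Int, (PySem.Dict.empty : PySem.Dict Int Int).getD v 0 = 0 := by
    intro v; rfl
  simp only [hgetD, zero_add]
  rw [h]
  simp only [List.length_nil]
  push_cast
  rw [zero_add]
  have : ∀ c : Int, c ^ 2 = c * c := fun c => sq c
  simp only [this]

-- ===== VERDICT (by name: the statement is the Claim_ definition above) =====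
theorem count_sqrts_spec : Claim_equal_count_sqrts := by
  intro nums _
  unfold Spec_count_sqrts
  exact count_sqrts_eq nums
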